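-- pv_equiv track=rewrite | github.com/lordlordy/Algorithms | algorithms.py | binomialcoeffientForRow
-- ===== SOURCE A (Python) =====
-- def binomialcoeffientForRow(n):
--     a = []
--     for i in range(n):
--         a.append((1))
--         c = len(a) - 1
--         while c > 0:
--             a[c] = a[c] + a[c-1]
--             c -= 1
--     return a
-- ===== SOURCE B (Python) =====
-- def binomialcoeffientForRow(n):
--     row = []
--     c = 1
--     for k in range(n):
--         row.append(c)
--         c = c * (n - k) // (k + 1)
--     return row
-- ===== Notes on version B (the rewrite author's own statement) =====
-- stated objective: faster
-- what changed: Replaced the quadratic in-place Pascal-triangle sweep (rebuild each row by backwards additions) with the one-pass multiplicative recurrence C(n,k+1)=C(n,k)*(n-k)//(k+1).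
import Mathlib
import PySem

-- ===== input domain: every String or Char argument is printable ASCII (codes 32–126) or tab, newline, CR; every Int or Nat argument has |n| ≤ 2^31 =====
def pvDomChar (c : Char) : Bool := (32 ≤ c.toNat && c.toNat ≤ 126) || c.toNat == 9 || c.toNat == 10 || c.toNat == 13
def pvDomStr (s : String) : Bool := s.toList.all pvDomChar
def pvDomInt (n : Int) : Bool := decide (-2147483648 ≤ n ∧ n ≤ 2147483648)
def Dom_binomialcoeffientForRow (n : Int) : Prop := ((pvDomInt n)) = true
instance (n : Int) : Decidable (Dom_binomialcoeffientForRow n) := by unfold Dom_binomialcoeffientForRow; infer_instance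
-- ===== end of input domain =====

-- B replaces A's quadratic in-place Pascal-row sweep with the one-pass multiplicative
-- recurrence C(n,k+1) = C(n,k)*(n-k)//(k+1); objective: faster (asymptotic).

-- ===== PORT A =====
-- the 'while c > 0: a[c] = a[c] + a[c-1]; c -= 1' loop; every index touched is in
-- range (0 ≤ c-1 < c < len a), so getD is exact for Python's a[c]
def pvInnerA : List Int → Nat → List Int
  | a, 0 => a
  | a, c+1 => pvInnerA (a.set (c+1) (a.getD (c+1) 0 + a.getD c 0)) c

def binomialcoeffientForRow (n : Int) : List Int :=
  (PySem.List.pyRange 0 n 1).foldl (fun a _ =>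
    let b := a ++ [(1 : Int)]
    pvInnerA b (b.length - 1)) []

-- ===== PORT B =====
def binomialcoeffientForRow_alt (n : Int) : List Int :=
  ((PySem.List.pyRange 0 n 1).foldl (fun st k =>
    (st.1 ++ [st.2], PySem.Int.floordiv (st.2 * (n - k)) (k + 1))) ([], 1)).1

-- ===== PRECONDITION & SPEC =====
def Spec_binomialcoeffientForRow (n : Int) (out : List Int) : Prop := out = binomialcoeffientForRow_alt n
instance (n : Int) (out : List Int) : Decidable (Spec_binomialcoeffientForRow n out) := by unfold Spec_binomialcoeffientForRow; infer_instance

-- ===== CLAIM (what is proved, stated in full; the proofs are below) =====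
def Claim_equal_binomialcoeffientForRow : Prop := ∀ (n : Int), Dom_binomialcoeffientForRow n → Spec_binomialcoeffientForRow n (binomialcoeffientForRow n)

-- ===== LEMMAS AND PROOFS =====

-- the row [C(N,0), …, C(N,m-1)] both loops build up
def pvRow (N m : Nat) : List Int := (List.range m).map (fun j => ((N.choose j : Nat) : Int))

theorem pvRow_length (N m : Nat) : (pvRow N m).length = m := by simp [pvRow]

theorem pvRow_succ (N m : Nat) :
    pvRow N (m+1) = pvRow N m ++ [((N.choose m : Nat) : Int)] := by
  simp [pvRow, List.range_succ]

theorem pvRow_getD (N L i : Nat) (hi : i < L) :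
    (pvRow N L).getD i 0 = ((N.choose i : Nat) : Int) := by
  simp [pvRow, List.getD_eq_getElem?_getD, List.getElem?_map, List.getElem?_range hi]

theorem pvInnerA_length : ∀ (c : Nat) (a : List Int), (pvInnerA a c).length = a.length := by
  intro c
  induction c with
  | zero => intro a; rfl
  | succ c ih => intro a; simp [pvInnerA, ih]

theorem pvInnerA_getD : ∀ (c : Nat) (a : List Int), c < a.length →
    ∀ j : Nat, (pvInnerA a c).getD j 0 =
      if 1 ≤ j ∧ j ≤ c then a.getD j 0 + a.getD (j-1) 0 else a.getD j 0 := by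
  intro c
  induction c with
  | zero =>
    intro a _ j
    exact (if_neg (by omega)).symm
  | succ c ih =>
    intro a hc j
    have hc' : c < (a.set (c+1) (a.getD (c+1) 0 + a.getD c 0)).length := by
      simp; omega
    have hset : ∀ i : Nat, i ≠ c+1 →
        (a.set (c+1) (a.getD (c+1) 0 + a.getD c 0)).getD i 0 = a.getD i 0 := by
      intro i hi
      simp [List.getD_eq_getElem?_getD, List.getElem?_set_ne (by omega : c+1 ≠ i)]
    have hsetc : (a.set (c+1) (a.getD (c+1) 0 + a.getD c 0)).getD (c+1) 0
        = a.getD (c+1) 0 + a.getD c 0 := by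
      simp [List.getD_eq_getElem?_getD, List.getElem?_set_self (by omega : c+1 < a.length)]
    rw [pvInnerA, ih _ hc' j]
    by_cases h1 : 1 ≤ j ∧ j ≤ c
    · rw [if_pos h1, if_pos (show 1 ≤ j ∧ j ≤ c+1 by omega),
        hset j (by omega), hset (j-1) (by omega)]
    · rw [if_neg h1]
      by_cases h2 : j = c + 1
      · subst h2
        rw [if_pos (by omega), hsetc]
        norm_num
      · rw [if_neg (by omega), hset j (by omega)]

-- one outer iteration of A: sweeping pvRow m m ++ [1] gives pvRow (m+1) (m+1)
theorem pvStepA (m : Nat) :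
    pvInnerA (pvRow m m ++ [1]) m = pvRow (m+1) (m+1) := by
  have hin : pvRow m m ++ [1] = pvRow m (m+1) := by
    rw [pvRow_succ]; simp
  rw [hin]
  apply List.ext_getElem
  · rw [pvInnerA_length, pvRow_length, pvRow_length]
  · intro j hj hj'
    have hjm : j < m + 1 := by rw [pvRow_length] at hj'; exact hj'
    rw [← List.getD_eq_getElem (pvInnerA (pvRow m (m+1)) m) 0 hj,
        ← List.getD_eq_getElem (pvRow (m+1) (m+1)) 0 hj',
        pvInnerA_getD m _ (by rw [pvRow_length]; omega) j,
        pvRow_getD (m+1) (m+1) j hjm]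
    by_cases h1 : 1 ≤ j ∧ j ≤ m
    · rw [if_pos h1, pvRow_getD m (m+1) j (by omega), pvRow_getD m (m+1) (j-1) (by omega)]
      obtain ⟨j', rfl⟩ : ∃ j', j = j' + 1 := ⟨j - 1, by omega⟩
      have h := Nat.choose_succ_succ m j'
      simp only [h]
      push_cast
      ring
    · rw [if_neg h1, pvRow_getD m (m+1) j (by omega)]
      have hj0 : j = 0 := by omega
      subst hj0; simp

-- the whole outer loop of A
theorem pvFoldA : ∀ (l : List Int) (m : Nat),
    l.foldl (fun a _ => let b := a ++ [(1 : Int)]; pvInnerA b (b.length - 1)) (pvRow m m)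
      = pvRow (m + l.length) (m + l.length) := by
  intro l
  induction l with
  | nil => intro m; simp
  | cons x xs ih =>
    intro m
    simp only [List.foldl_cons]
    have hb : (pvRow m m ++ [(1:Int)]).length - 1 = m := by simp [pvRow_length]
    show xs.foldl _ (pvInnerA (pvRow m m ++ [(1:Int)]) ((pvRow m m ++ [(1:Int)]).length - 1)) = _
    rw [hb, pvStepA, ih (m+1)]
    have he : m + 1 + xs.length = m + (x :: xs).length := by simp; omega
    rw [he]

theorem pvA_eq (n : Int) (hn : 0 ≤ n) :
    binomialcoeffientForRow n = pvRow n.toNat n.toNat := by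
  unfold binomialcoeffientForRow
  have hlen : (PySem.List.pyRange 0 n 1).length = n.toNat := by
    rw [PySem.List.length_pyRange_one]; omega
  have h := pvFoldA (PySem.List.pyRange 0 n 1) 0
  rw [show pvRow 0 0 = ([] : List Int) by simp [pvRow]] at h
  rw [h, hlen]
  norm_num

-- B's fold invariant
theorem pvFoldB (n : Int) (hn : 0 ≤ n) : ∀ (d m : Nat), m + d = n.toNat →
    ((PySem.List.pyRange (m : Int) n 1).foldl (fun st k =>
        (st.1 ++ [st.2], PySem.Int.floordiv (st.2 * (n - k)) (k + 1)))
      (pvRow n.toNat m, ((n.toNat.choose m : Nat) : Int))).1 = pvRow n.toNat n.toNat := by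
  intro d
  induction d with
  | zero =>
    intro m hm
    rw [PySem.List.pyRange_one_eq_nil (by omega)]
    simp [hm.symm]
  | succ d ih =>
    intro m hm
    have hmn : (m : Int) < n := by omega
    have hid : n.toNat.choose (m+1) * (m+1) = n.toNat.choose m * (n.toNat - m) :=
      Nat.choose_succ_right_eq n.toNat m
    have hc : PySem.Int.floordiv (((n.toNat.choose m : Nat) : Int) * (n - (m : Int))) ((m : Int) + 1)
        = ((n.toNat.choose (m+1) : Nat) : Int) := by
      have hsub : n - (m : Int) = ((n.toNat - m : Nat) : Int) := by omega
      have hcast : ((n.toNat.choose m : Nat) : Int) * ((n.toNat - m : Nat) : Int)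
          = ((n.toNat.choose (m+1) : Nat) : Int) * ((m : Int) + 1) := by
        exact_mod_cast hid.symm
      rw [hsub, PySem.Int.floordiv_eq_ediv_of_pos (by omega), hcast]
      exact Int.mul_ediv_cancel _ (by omega)
    have ih' := ih (m+1) (by omega)
    rw [show ((m+1 : Nat) : Int) = (m : Int) + 1 by push_cast; ring] at ih'
    rw [PySem.List.pyRange_one_cons hmn]
    simp only [List.foldl_cons]
    rw [hc, ← pvRow_succ]
    exact ih'

theorem pvB_eq (n : Int) (hn : 0 ≤ n) :
    binomialcoeffientForRow_alt n = pvRow n.toNat n.toNat := by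
  unfold binomialcoeffientForRow_alt
  have h := pvFoldB n hn n.toNat 0 (by omega)
  rw [show pvRow n.toNat 0 = ([] : List Int) by simp [pvRow]] at h
  rw [show ((n.toNat.choose 0 : Nat) : Int) = 1 by simp] at h
  rw [show ((0 : Nat) : Int) = (0 : Int) by simp] at h
  exact h

-- ===== VERDICT (by name: the statement is the Claim_ definition above) =====
theorem binomialcoeffientForRow_spec : Claim_equal_binomialcoeffientForRow := by
  intro n _
  unfold Spec_binomialcoeffientForRow
  by_cases hn : 0 ≤ n
  · rw [pvA_eq n hn, pvB_eq n hn]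
  · unfold binomialcoeffientForRow binomialcoeffientForRow_alt
    rw [PySem.List.pyRange_one_eq_nil (by omega)]
    rfl
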